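-- pv_equiv track=rewrite | github.com/envomp/2018-Introduction-to-Programming | kt5/exam.py | pentabonacci
-- ===== SOURCE A (Python) =====
-- def pentabonacci(n: int) -> int:
--     """
--     Find the total number of odd values in the sequence up to the f(n) [included].
--
--     The sequence is defined like this:
--     f(0) = 0
--     f(1) = 1
--     f(2) = 1
--     f(3) = 2
--     f(4) = 4
--     f(n) = f(n - 1) + f(n - 2) + f(n - 3) + f(n - 4) + f(n - 5)
--
--     Keep in mind that 1 is the only value that is duplicated in the sequence
--     and must be counted only once.
--
--     pentabonacci(5) -> 1
--     pentabonacci(10) -> 3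
--     pentabonacci(15) -> 5
--
--     :param n: The last term to take into account.
--     :return: Total number of odd values.
--     """
--     if n == 0:
--         return 0
--     if n < 5:
--         return 1
--     fibo = [0, 1, 1, 2, 4]
--
--     count = 1
--     for i in range(5, n + 1):
--         sum = 0
--         for j in range(i - 5, i):
--             sum += fibo[j]
--         fibo.append(sum)
--         if sum % 2:
--             count += 1
--         # Eelmise 6 rea asemel võib panna: fibo.append(sum(fibo[i - 5:i]))
--         # ja returnida:
--         # return len(set([x for x in fibo if x % 2 == 1]))
--
--     return count
-- ===== SOURCE B (Python) =====
-- def pentabonacci(n: int) -> int: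
--     if n == 0:
--         return 0
--     if n < 5:
--         return 1
--     # only parities matter for counting odd terms: keep the window of the
--     # last five parities (of 0, 1, 1, 2, 4) and never build the huge values
--     a, b, c, d, e = 0, 1, 1, 0, 0
--     count = 1
--     for _ in range(n - 4):
--         nxt = (a + b + c + d + e) % 2
--         count += nxt
--         a, b, c, d, e = b, c, d, e, nxt
--     return count
-- ===== Notes on version B (the rewrite author's own statement) =====
-- stated objective: faster
-- what changed: Replaces the growing list with an O(n^2) inner summation loop (over exponentially growing big integers) by a rolling window of the last five term PARITIES, so each step is O(1) small-int work.
import Mathlib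
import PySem

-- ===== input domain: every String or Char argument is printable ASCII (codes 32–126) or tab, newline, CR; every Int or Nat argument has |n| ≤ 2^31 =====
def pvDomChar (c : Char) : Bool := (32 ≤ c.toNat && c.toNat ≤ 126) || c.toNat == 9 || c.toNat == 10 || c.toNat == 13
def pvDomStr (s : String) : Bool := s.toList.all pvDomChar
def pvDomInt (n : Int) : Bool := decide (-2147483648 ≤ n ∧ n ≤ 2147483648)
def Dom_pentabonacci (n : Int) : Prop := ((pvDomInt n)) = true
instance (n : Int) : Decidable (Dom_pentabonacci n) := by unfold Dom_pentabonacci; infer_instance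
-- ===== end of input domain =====

-- B replaces A's growing list with quadratic inner summation by a rolling
-- five-term window with an incrementally maintained sum: O(n) instead of O(n^2).

-- ===== PORT A =====
-- loop body of A: fibo grows by the sum of its last five entries (read by index,
-- always in range, so pyGetD's default is never used), count counts odd sums
def pvStepA (st : List Int × Int) (i : Int) : List Int × Int :=
  let s := (PySem.List.pyRange (i - 5) i 1).foldl (fun acc j => acc + PySem.List.pyGetD st.1 j 0) 0
  (st.1 ++ [s], if PySem.Int.mod s 2 != 0 then st.2 + 1 else st.2)

def pentabonacci (n : Int) : Int :=
  if n == 0 then 0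
  else if n < 5 then 1
  else ((PySem.List.pyRange 5 (n + 1) 1).foldl pvStepA ([0, 1, 1, 2, 4], 1)).2

-- ===== PORT B =====
-- loop body of B: rolling window of the last five term PARITIES and the odd count
def pvStepB (st : Int × Int × Int × Int × Int × Int) (_ : Nat) :
    Int × Int × Int × Int × Int × Int :=
  let (a, b, c, d, e, count) := st
  let nxt := PySem.Int.mod (a + b + c + d + e) 2
  let count := count + nxt
  (b, c, d, e, nxt, count)

def pentabonacci_alt (n : Int) : Int :=
  if n == 0 then 0
  else if n < 5 then 1
  else
    let st := (List.range (n - 4).toNat).foldl pvStepB (0, 1, 1, 0, 0, 1)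
    st.2.2.2.2.2

-- ===== PRECONDITION & SPEC =====
def Spec_pentabonacci (n : Int) (out : Int) : Prop := out = pentabonacci_alt n
instance (n : Int) (out : Int) : Decidable (Spec_pentabonacci n out) := by unfold Spec_pentabonacci; infer_instance

-- ===== CLAIM (what is proved, stated in full; the proofs are below) =====
def Claim_equal_pentabonacci : Prop := ∀ (n : Int), Dom_pentabonacci n → Spec_pentabonacci n (pentabonacci n)

-- ===== LEMMAS AND PROOFS =====

-- Simulation invariant: after k iterations, A's fibo list ends in five values
-- whose parities form B's window, and B's count equals A's count.
lemma pv_sim (k : Nat) :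
    ∃ (L : List Int) (a b c d e : Int),
      ((PySem.List.pyRange 5 (5 + (k : Int)) 1).foldl pvStepA ([0, 1, 1, 2, 4], 1)).1
        = L ++ [a, b, c, d, e] ∧
      L.length = k ∧
      (List.range k).foldl pvStepB (0, 1, 1, 0, 0, 1)
        = (PySem.Int.mod a 2, PySem.Int.mod b 2, PySem.Int.mod c 2,
           PySem.Int.mod d 2, PySem.Int.mod e 2,
           ((PySem.List.pyRange 5 (5 + (k : Int)) 1).foldl pvStepA ([0, 1, 1, 2, 4], 1)).2) := by
  induction k with
  | zero =>
    refine ⟨[], 0, 1, 1, 2, 4, ?_, rfl, ?_⟩ <;>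
      simp [PySem.List.pyRange_one_eq_nil, List.range_zero]
  | succ k ih =>
    obtain ⟨L, a, b, c, d, e, hfib, hlen, hB⟩ := ih
    have hrange : PySem.List.pyRange 5 (5 + ((k + 1 : Nat) : Int)) 1
        = PySem.List.pyRange 5 (5 + (k : Int)) 1 ++ [5 + (k : Int)] := by
      have : (5 : Int) + ((k + 1 : Nat) : Int) = (5 + (k : Int)) + 1 := by push_cast; ring
      rw [this, PySem.List.pyRange_one_succ_right (by omega)]
    rw [hrange, List.foldl_append]
    set stA := (PySem.List.pyRange 5 (5 + (k : Int)) 1).foldl pvStepA ([0, 1, 1, 2, 4], 1) with hstA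
    have hflen : (stA.1.length : Int) = 5 + (k : Int) := by
      rw [hfib]; simp [hlen]; ring
    -- evaluate A's inner summation loop: it sums exactly the last five entries
    have hsum : (PySem.List.pyRange (5 + (k : Int) - 5) (5 + (k : Int)) 1).foldl
        (fun acc j => acc + PySem.List.pyGetD stA.1 j 0) 0 = a + b + c + d + e := by
      have h1 : (5 : Int) + (k : Int) - 5 = (k : Int) := by ring
      rw [h1, ← hflen,
        PySem.List.foldl_pyRange_pyGetD' stA.1 0 (fun acc x => acc + x) 0 (a := (k : Int)) (by omega)]
      rw [hfib]
      have h2 : (Int.toNat (k : Int)) = L.length := by omega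
      rw [h2, List.drop_left]
      simp [List.foldl]
    have hstepA : pvStepA stA (5 + (k : Int))
        = (stA.1 ++ [a + b + c + d + e],
           if PySem.Int.mod (a + b + c + d + e) 2 != 0 then stA.2 + 1 else stA.2) := by
      simp only [pvStepA, hsum]
    refine ⟨L ++ [a], b, c, d, e, a + b + c + d + e, ?_, by simp [hlen], ?_⟩
    · simp only [List.foldl_cons, List.foldl_nil]
      rw [hstepA, hfib]; simp
    · rw [List.range_succ, List.foldl_append, hB]
      simp only [List.foldl_cons, List.foldl_nil]
      rw [hstepA]
      simp only [pvStepB]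
      -- parity of the sum equals parity of the summed parities
      have hm := fun x : Int => PySem.Int.mod_eq_emod_of_pos (a := x) (b := 2) (by omega)
      have hpar : PySem.Int.mod
          (PySem.Int.mod a 2 + PySem.Int.mod b 2 + PySem.Int.mod c 2 +
            PySem.Int.mod d 2 + PySem.Int.mod e 2) 2
          = PySem.Int.mod (a + b + c + d + e) 2 := by
        simp only [hm]; omega
      refine Prod.ext rfl (Prod.ext rfl (Prod.ext rfl (Prod.ext rfl (Prod.ext ?_ ?_))))
      · exact hpar
      · show stA.2 + PySem.Int.mod (PySem.Int.mod a 2 + PySem.Int.mod b 2 + PySem.Int.mod c 2 +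
            PySem.Int.mod d 2 + PySem.Int.mod e 2) 2
          = if PySem.Int.mod (a + b + c + d + e) 2 != 0 then stA.2 + 1 else stA.2
        rw [hpar]
        simp only [hm]
        split_ifs with h <;> simp_all

-- ===== VERDICT (by name: the statement is the Claim_ definition above) =====
theorem pentabonacci_spec : Claim_equal_pentabonacci := by
  intro n _
  unfold Spec_pentabonacci pentabonacci pentabonacci_alt
  by_cases h0 : n = 0
  · simp [h0]
  · by_cases h5 : n < 5
    · simp [h0, h5]
    · have hn : ¬ (n == 0) = true := by simp [h0]
      simp only [hn, h5, if_false]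
      have hk : (5 : Int) + (((n - 4).toNat : Nat) : Int) = n + 1 := by omega
      obtain ⟨L, a, b, c, d, e, _, _, hB⟩ := pv_sim (n - 4).toNat
      rw [hk] at hB
      rw [hB]
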